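-- pv_equiv track=rewrite | github.com/vsbpdev/junior-ai | enhanced_context_aware_matching.py | _group_nearby_positions
-- ===== SOURCE A (Python) =====
-- from typing import Dict, List, Optional, Set, Tuple, Union, Any
--
-- def _group_nearby_positions(positions: List[int], proximity: int = 500) -> List[List[int]]:
--     """Group positions that are close together"""
--     if not positions:
--         return []
--
--     sorted_positions = sorted(positions)
--     groups = [[sorted_positions[0]]]
--
--     for pos in sorted_positions[1:]:
--         if pos - groups[-1][-1] <= proximity:
--             groups[-1].append(pos)
--         else:
--             groups.append([pos])
--
--     return groups
-- ===== SOURCE B (Python) =====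
-- def _group_nearby_positions(positions, proximity=500):
--     """Group positions that are close together.
--
--     Two-phase: first compute the boundary indices (cuts) of the sorted list
--     where the gap between consecutive positions exceeds proximity, then
--     partition the sorted list by slicing between successive boundaries."""
--     s = sorted(positions)
--     if not s:
--         return []
--     n = len(s)
--     cuts = [i for i in range(1, n) if s[i] - s[i - 1] > proximity]
--     bounds = [0] + cuts + [n]
--     return [s[bounds[k]:bounds[k + 1]] for k in range(len(bounds) - 1)]
-- ===== Notes on version B (the rewrite author's own statement) =====
-- stated objective: alternative
-- what changed: Replaces A's fused scan that appends each position to a growing last group with a two-phase computation: first find all boundary indices where consecutive sorted positions differ by more than proximity, then build the groups by slicing the sorted list between successive boundaries.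
import Mathlib
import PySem

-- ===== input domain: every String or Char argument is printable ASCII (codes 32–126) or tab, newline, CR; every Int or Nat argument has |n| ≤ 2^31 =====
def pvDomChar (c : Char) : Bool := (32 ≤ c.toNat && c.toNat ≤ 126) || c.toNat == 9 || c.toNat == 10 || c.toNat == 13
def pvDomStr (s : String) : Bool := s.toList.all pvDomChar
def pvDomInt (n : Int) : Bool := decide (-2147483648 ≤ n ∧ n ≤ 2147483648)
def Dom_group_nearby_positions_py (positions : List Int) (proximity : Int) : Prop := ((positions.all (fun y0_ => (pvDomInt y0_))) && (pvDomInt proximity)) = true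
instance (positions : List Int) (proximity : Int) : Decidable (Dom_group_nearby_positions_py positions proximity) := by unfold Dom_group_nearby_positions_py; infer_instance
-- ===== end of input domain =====

-- B replaces A's fused scan-and-append loop by a two-phase computation: find the boundary
-- indices where consecutive sorted positions differ by more than proximity, then slice the
-- sorted list between successive boundaries; objective: alternative.

-- ===== PORT A =====
-- one loop step of A: mutate the last group in place or append a new singleton group
def pyStepA (proximity : Int) (groups : List (List Int)) (pos : Int) : List (List Int) :=
  if pos - (groups.getLastD []).getLastD 0 ≤ proximity then
    groups.dropLast ++ [(groups.getLastD []) ++ [pos]]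
  else
    groups ++ [[pos]]

def group_nearby_positions_py (positions : List Int) (proximity : Int) : List (List Int) :=
  if positions = [] then []
  else
    match PySem.List.sorted positions (fun x => x) false with
    | [] => []   -- unreachable: sorted of a nonempty list is nonempty
    | h :: t => t.foldl (pyStepA proximity) [[h]]

-- ===== PORT B =====
def group_nearby_positions_py_alt (positions : List Int) (proximity : Int) : List (List Int) :=
  let s := PySem.List.sorted positions (fun x => x) false
  if s = [] then []
  else
    let n : Int := s.length
    let cuts := (PySem.List.pyRange 1 n 1).filter
      (fun i => decide (proximity < PySem.List.pyGetD s i 0 - PySem.List.pyGetD s (i - 1) 0))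
    let bounds := 0 :: cuts ++ [n]
    (PySem.List.pyRange 0 ((bounds.length : Int) - 1) 1).map
      (fun k => PySem.List.slice s (some (PySem.List.pyGetD bounds k 0))
                                   (some (PySem.List.pyGetD bounds (k + 1) 0)))

-- ===== PRECONDITION & SPEC =====
def Spec_group_nearby_positions_py (positions : List Int) (proximity : Int) (out : List (List Int)) : Prop := out = group_nearby_positions_py_alt positions proximity
instance (positions : List Int) (proximity : Int) (out : List (List Int)) : Decidable (Spec_group_nearby_positions_py positions proximity out) := by unfold Spec_group_nearby_positions_py; infer_instance

-- ===== CLAIM (what is proved, stated in full; the proofs are below) =====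
def Claim_equal_group_nearby_positions_py : Prop := ∀ (positions : List Int) (proximity : Int), Dom_group_nearby_positions_py positions proximity → Spec_group_nearby_positions_py positions proximity (group_nearby_positions_py positions proximity)

-- ===== LEMMAS AND PROOFS =====

-- canonical recursive description of A's loop: finish the current group `cur`, then the rest
def pvConsume (prox : Int) : List Int → List Int → List (List Int)
  | cur, [] => [cur]
  | cur, p :: ps =>
    if p - cur.getLastD 0 ≤ prox then pvConsume prox (cur ++ [p]) ps
    else cur :: pvConsume prox [p] ps

-- canonical recursive grouping of c :: t, from the right
def pvGof (prox : Int) : Int → List Int → List (List Int)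
  | c, [] => [[c]]
  | c, p :: ps =>
    match pvGof prox p ps with
    | [] => [[c]]
    | g :: gs => if p - c ≤ prox then (c :: g) :: gs else [c] :: g :: gs

-- B's cut indices of a list, and slicing between successive bounds
def pvCuts (prox : Int) (s : List Int) : List Int :=
  (PySem.List.pyRange 1 (s.length : Int) 1).filter
    (fun i => decide (prox < PySem.List.pyGetD s i 0 - PySem.List.pyGetD s (i - 1) 0))

def pvPairSlices (s : List Int) : List Int → List (List Int)
  | a :: b :: r => PySem.List.slice s (some a) (some b) :: pvPairSlices s (b :: r)
  | _ => []

theorem pvFoldlA_eq (prox : Int) : ∀ (t : List Int) (gs : List (List Int)) (cur : List Int),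
    List.foldl (pyStepA prox) (gs ++ [cur]) t = gs ++ pvConsume prox cur t := by
  intro t
  induction t with
  | nil => intro gs cur; simp [pvConsume]
  | cons p ps ih =>
    intro gs cur
    have hlast : (gs ++ [cur]).getLastD ([] : List Int) = cur := by simp
    have hdrop : (gs ++ [cur]).dropLast = gs := by simp
    have hstep : pyStepA prox (gs ++ [cur]) p
        = if p - cur.getLastD 0 ≤ prox then gs ++ [cur ++ [p]] else (gs ++ [cur]) ++ [[p]] := by
      unfold pyStepA; rw [hlast, hdrop]
    by_cases h : p - cur.getLastD 0 ≤ prox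
    · rw [List.foldl_cons, hstep, if_pos h, ih gs (cur ++ [p])]
      rw [show pvConsume prox cur (p :: ps) = pvConsume prox (cur ++ [p]) ps from by
        simp only [pvConsume, if_pos h]]
    · rw [List.foldl_cons, hstep, if_neg h, ih (gs ++ [cur]) [p]]
      rw [show pvConsume prox cur (p :: ps) = cur :: pvConsume prox [p] ps from by
        simp only [pvConsume, if_neg h]]
      simp

theorem pvConsume_shift (prox : Int) : ∀ (t : List Int) (cur : List Int) (c : Int),
    pvConsume prox (cur ++ [c]) t
      = (cur ++ (pvConsume prox [c] t).headI) :: (pvConsume prox [c] t).tail := by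
  intro t
  induction t with
  | nil => intro cur c; simp [pvConsume]
  | cons p ps ih =>
    intro cur c
    by_cases h : p - c ≤ prox
    · have h1 : pvConsume prox (cur ++ [c]) (p :: ps)
          = pvConsume prox ((cur ++ [c]) ++ [p]) ps := by
        simp [pvConsume, h]
      have h2 : pvConsume prox [c] (p :: ps) = pvConsume prox ([c] ++ [p]) ps := by
        simp [pvConsume, h]
      rw [h1, h2, ih ([c]) p, ih (cur ++ [c]) p]
      simp
    · have h1 : pvConsume prox (cur ++ [c]) (p :: ps)
          = (cur ++ [c]) :: pvConsume prox [p] ps := by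
        simp [pvConsume, h]
      have h2 : pvConsume prox [c] (p :: ps) = [c] :: pvConsume prox [p] ps := by
        simp [pvConsume, h]
      rw [h1, h2]
      simp

theorem pvGof_head (prox : Int) : ∀ (t : List Int) (c : Int),
    ∃ r gs, pvGof prox c t = (c :: r) :: gs := by
  intro t
  induction t with
  | nil => intro c; exact ⟨[], [], rfl⟩
  | cons p ps ih =>
    intro c
    obtain ⟨r, gs, h⟩ := ih p
    by_cases hc : p - c ≤ prox
    · exact ⟨p :: r, gs, by simp [pvGof, h, hc]⟩
    · exact ⟨[], (p :: r) :: gs, by simp [pvGof, h, hc]⟩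

theorem pvConsume_single (prox : Int) : ∀ (t : List Int) (c : Int),
    pvConsume prox [c] t = pvGof prox c t := by
  intro t
  induction t with
  | nil => intro c; simp [pvConsume, pvGof]
  | cons p ps ih =>
    intro c
    obtain ⟨r, gs, h⟩ := pvGof_head prox ps p
    by_cases hc : p - c ≤ prox
    · have h1 : pvConsume prox [c] (p :: ps) = pvConsume prox ([c] ++ [p]) ps := by
        simp [pvConsume, hc]
      rw [h1, pvConsume_shift prox ps [c] p, ih, h]
      simp [pvGof, h, hc]
    · have h1 : pvConsume prox [c] (p :: ps) = [c] :: pvConsume prox [p] ps := by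
        simp [pvConsume, hc]
      rw [h1, ih, h]
      simp [pvGof, h, hc]

-- index-shift for pyGetD on a cons cell (nonnegative index)
theorem pvGetD_shift (a : Int) (l : List Int) (i : Int) (d : Int) (hi : 0 ≤ i) :
    PySem.List.pyGetD (a :: l) (i + 1) d = PySem.List.pyGetD l i d := by
  obtain ⟨k, rfl⟩ := Int.eq_ofNat_of_zero_le hi
  have : (k : Int) + 1 = ((k + 1 : Nat) : Int) := by push_cast; ring
  rw [this, PySem.List.pyGetD_natCast, PySem.List.pyGetD_natCast]
  simp

-- slice shift on a cons cell (nonnegative bounds)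
theorem pvSlice_shift (h : Int) (t : List Int) (a b : Int) (ha : 0 ≤ a) (hb : 0 ≤ b) :
    PySem.List.slice (h :: t) (some (a + 1)) (some (b + 1))
      = PySem.List.slice t (some a) (some b) := by
  obtain ⟨j, rfl⟩ := Int.eq_ofNat_of_zero_le ha
  obtain ⟨m, rfl⟩ := Int.eq_ofNat_of_zero_le hb
  rw [PySem.List.slice_toNat _ (by positivity) (by positivity),
      PySem.List.slice_toNat _ (by positivity) (by positivity)]
  have e1 : ((j : Int) + 1).toNat = j + 1 := by omega
  have e2 : ((m : Int) + 1).toNat = m + 1 := by omega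
  rw [e1, e2]
  simp

theorem pvSlice_zero_cons (h : Int) (t : List Int) (b : Int) (hb : 1 ≤ b) :
    PySem.List.slice (h :: t) (some 0) (some b)
      = h :: PySem.List.slice t (some 0) (some (b - 1)) := by
  rw [PySem.List.slice_toNat _ le_rfl (by omega),
      PySem.List.slice_toNat _ le_rfl (by omega)]
  have e : b.toNat = (b - 1).toNat + 1 := by omega
  simp only [Int.toNat_zero, Nat.sub_zero, List.drop_zero, e, List.take_succ_cons]

-- the indexed comprehension over successive bounds IS pvPairSlices
theorem pvRangeSlices_eq : ∀ (bs : List Int) (s : List Int),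
    (PySem.List.pyRange 0 ((bs.length : Int) - 1) 1).map
      (fun k => PySem.List.slice s (some (PySem.List.pyGetD bs k 0))
                                   (some (PySem.List.pyGetD bs (k + 1) 0)))
      = pvPairSlices s bs := by
  intro bs
  induction bs with
  | nil => intro s; rfl
  | cons a r ih =>
    intro s
    cases r with
    | nil =>
      simp only [List.length_cons, List.length_nil]
      rw [show ((0 + 1 : Nat) : Int) - 1 = 0 from by norm_num,
          PySem.List.pyRange_one_eq_nil le_rfl]
      rfl
    | cons b r2 =>
      have hlen : ((a :: b :: r2).length : Int) - 1 = ((b :: r2).length : Int) := by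
        simp
      rw [hlen, PySem.List.pyRange_one_cons (by simp), List.map_cons]
      have hhead : PySem.List.slice s (some (PySem.List.pyGetD (a :: b :: r2) 0 0))
            (some (PySem.List.pyGetD (a :: b :: r2) (0 + 1) 0))
          = PySem.List.slice s (some a) (some b) := by
        rw [pvGetD_shift _ _ _ _ le_rfl]
        simp [pysem]
      have hshr : PySem.List.pyRange (0 + 1) (((b :: r2).length : Int)) 1
          = (PySem.List.pyRange 0 (((b :: r2).length : Int) - 1) 1).map (· + 1) := by
        rw [PySem.List.pyRange_one, PySem.List.pyRange_one, List.map_map]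
        have e : ((((b :: r2).length : Int) - 1) - 0).toNat
            = ((((b :: r2).length : Int)) - (0 + 1)).toNat := by omega
        rw [e]
        apply List.map_congr_left
        intro k _
        simp [Function.comp]; ring
      rw [hshr, List.map_map]
      have htail : ((PySem.List.pyRange 0 (((b :: r2).length : Int) - 1) 1).map
            ((fun k => PySem.List.slice s (some (PySem.List.pyGetD (a :: b :: r2) k 0))
                (some (PySem.List.pyGetD (a :: b :: r2) (k + 1) 0))) ∘ (· + 1)))
          = (PySem.List.pyRange 0 (((b :: r2).length : Int) - 1) 1).map
            (fun k => PySem.List.slice s (some (PySem.List.pyGetD (b :: r2) k 0))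
                (some (PySem.List.pyGetD (b :: r2) (k + 1) 0))) := by
        apply List.map_congr_left
        intro k hk
        have h0k : (0:Int) ≤ k := (PySem.List.mem_pyRange_one.mp hk).1
        have e1 : PySem.List.pyGetD (a :: b :: r2) (k + 1) 0
            = PySem.List.pyGetD (b :: r2) k 0 := pvGetD_shift _ _ _ _ h0k
        have e2 : PySem.List.pyGetD (a :: b :: r2) (k + 1 + 1) 0
            = PySem.List.pyGetD (b :: r2) (k + 1) 0 := pvGetD_shift _ _ _ _ (by omega)
        simp only [Function.comp_apply, e1, e2]
      rw [htail, hhead, ih s]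
      rfl

-- decomposition of the cut indices of a two-element-headed list
theorem pvCuts_cons₂ (prox h p : Int) (ps : List Int) :
    pvCuts prox (h :: p :: ps)
      = (if prox < p - h then [1] else []) ++ (pvCuts prox (p :: ps)).map (· + 1) := by
  have hsh : PySem.List.pyRange (1 + 1) (((h :: p :: ps).length : Int)) 1
      = (PySem.List.pyRange 1 (((p :: ps).length : Int)) 1).map (· + 1) := by
    rw [PySem.List.pyRange_one, PySem.List.pyRange_one, List.map_map]
    have e : (((p :: ps).length : Int) - 1).toNat
        = (((h :: p :: ps).length : Int) - (1 + 1)).toNat := by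
      simp
      omega
    rw [e]
    apply List.map_congr_left
    intro k _
    simp [Function.comp]; ring
  unfold pvCuts
  rw [PySem.List.pyRange_one_cons (by simp), List.filter_cons, hsh, List.filter_map]
  have htail : List.filter
        ((fun i => decide (prox < PySem.List.pyGetD (h :: p :: ps) i 0
            - PySem.List.pyGetD (h :: p :: ps) (i - 1) 0)) ∘ (· + 1))
        (PySem.List.pyRange 1 (((p :: ps).length : Int)) 1)
      = List.filter
        (fun i => decide (prox < PySem.List.pyGetD (p :: ps) i 0
            - PySem.List.pyGetD (p :: ps) (i - 1) 0))
        (PySem.List.pyRange 1 (((p :: ps).length : Int)) 1) := by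
    apply List.filter_congr
    intro i hi
    have h1i : (1:Int) ≤ i := (PySem.List.mem_pyRange_one.mp hi).1
    have e1 : PySem.List.pyGetD (h :: p :: ps) (i + 1) 0 = PySem.List.pyGetD (p :: ps) i 0 :=
      pvGetD_shift _ _ _ _ (by omega)
    have e2 : PySem.List.pyGetD (h :: p :: ps) (i + 1 - 1) 0
        = PySem.List.pyGetD (p :: ps) (i - 1) 0 := by
      have : i + 1 - 1 = (i - 1) + 1 := by ring
      rw [this, pvGetD_shift _ _ _ _ (by omega)]
    simp only [Function.comp_apply, e1, e2]
  rw [htail]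
  have e1 : PySem.List.pyGetD (h :: p :: ps) 1 0 = p := by simp [pysem]
  have e0 : PySem.List.pyGetD (h :: p :: ps) (1 - 1) 0 = h := by norm_num [pysem]
  rw [e1, e0]
  by_cases hc : prox < p - h <;> simp [hc]

theorem pvCuts_mem_pos (prox : Int) (s : List Int) (x : Int) (hx : x ∈ pvCuts prox s) :
    1 ≤ x := by
  have := (List.mem_filter.mp hx).1
  exact (PySem.List.mem_pyRange_one.mp this).1

theorem pvPairSlices_shift (c : Int) (t : List Int) : ∀ (bs : List Int),
    (∀ x ∈ bs, 0 ≤ x) →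
    pvPairSlices (c :: t) (bs.map (· + 1)) = pvPairSlices t bs := by
  intro bs
  induction bs with
  | nil => intro _; rfl
  | cons a r ih =>
    intro hpos
    cases r with
    | nil => rfl
    | cons b r2 =>
      have ha : 0 ≤ a := hpos a (by simp)
      have hb : 0 ≤ b := hpos b (by simp)
      show PySem.List.slice (c :: t) (some (a + 1)) (some (b + 1))
            :: pvPairSlices (c :: t) ((b :: r2).map (· + 1))
          = PySem.List.slice t (some a) (some b) :: pvPairSlices t (b :: r2)
      rw [pvSlice_shift c t a b ha hb, ih (fun x hx => hpos x (by simp [hx]))]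

-- B's two-phase slicing computes the canonical grouping
theorem pvSliced_eq (prox : Int) : ∀ (t : List Int) (h : Int),
    pvPairSlices (h :: t) (0 :: pvCuts prox (h :: t) ++ [((h :: t).length : Int)])
      = pvGof prox h t := by
  intro t
  induction t with
  | nil =>
    intro h
    have hc : pvCuts prox [h] = [] := by
      unfold pvCuts
      rw [show (([h].length : Int)) = 1 from by simp, PySem.List.pyRange_one_eq_nil le_rfl]
      rfl
    rw [hc]
    show PySem.List.slice [h] (some 0) (some (([h].length : Int)))
        :: pvPairSlices [h] [(([h].length : Int))] = [[h]]
    rw [show (([h].length : Int)) = 1 from by simp,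
        PySem.List.slice_toNat _ le_rfl (by norm_num)]
    rfl
  | cons p ps ih =>
    intro h
    obtain ⟨r, gs, hg⟩ := pvGof_head prox ps p
    have hpos : ∀ x ∈ (0 : Int) :: pvCuts prox (p :: ps) ++ [(((p :: ps).length : Int))], 0 ≤ x := by
      intro x hx
      rcases List.mem_cons.mp hx with hx | hx
      · omega
      rcases List.mem_append.mp hx with hx | hx
      · exact le_trans (by norm_num) (pvCuts_mem_pos prox _ x hx)
      · simp at hx; subst hx; positivity
    have hlen : (((h :: p :: ps).length : Int)) = (((p :: ps).length : Int)) + 1 := by simp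
    rw [pvCuts_cons₂, hlen]
    by_cases hb : prox < p - h
    · rw [if_pos hb]
      have hre : (0 : Int) :: ([1] ++ (pvCuts prox (p :: ps)).map (· + 1))
            ++ [(((p :: ps).length : Int)) + 1]
          = 0 :: 1 :: (((0 : Int) :: pvCuts prox (p :: ps) ++ [(((p :: ps).length : Int))]).map
              (· + 1)).tail := by
        simp
      rw [hre]
      show PySem.List.slice (h :: p :: ps) (some 0) (some 1)
          :: pvPairSlices (h :: p :: ps)
            (1 :: (((0 : Int) :: pvCuts prox (p :: ps)
              ++ [(((p :: ps).length : Int))]).map (· + 1)).tail)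
          = pvGof prox h (p :: ps)
      have h01 : (1 : Int) :: (((0 : Int) :: pvCuts prox (p :: ps)
            ++ [(((p :: ps).length : Int))]).map (· + 1)).tail
          = ((0 : Int) :: pvCuts prox (p :: ps) ++ [(((p :: ps).length : Int))]).map (· + 1) := by
        simp
      rw [h01, pvPairSlices_shift h (p :: ps) _ hpos, ih]
      have hs1 : PySem.List.slice (h :: p :: ps) (some 0) (some 1) = [h] := by
        rw [PySem.List.slice_toNat _ le_rfl (by norm_num)]
        rfl
      rw [hs1, hg]
      simp [pvGof, hg, show ¬ (p - h ≤ prox) from by omega]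
    · rw [if_neg hb]
      obtain ⟨b1, rest, hbs⟩ : ∃ b1 rest,
          pvCuts prox (p :: ps) ++ [(((p :: ps).length : Int))] = b1 :: rest := by
        cases hq : pvCuts prox (p :: ps) ++ [(((p :: ps).length : Int))] with
        | nil => exact absurd hq (by simp)
        | cons x y => exact ⟨x, y, rfl⟩
      have hmem : b1 ∈ pvCuts prox (p :: ps) ++ [(((p :: ps).length : Int))] := by
        rw [hbs]; simp
      have hb1 : (0:Int) ≤ b1 := hpos b1 (by
        rw [List.cons_append]; exact List.mem_cons_of_mem _ hmem)
      have hre : (0 : Int) :: ([] ++ (pvCuts prox (p :: ps)).map (· + 1))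
            ++ [(((p :: ps).length : Int)) + 1]
          = 0 :: (b1 + 1) :: rest.map (· + 1) := by
        have : (pvCuts prox (p :: ps)).map (· + 1) ++ [(((p :: ps).length : Int)) + 1]
            = (pvCuts prox (p :: ps) ++ [(((p :: ps).length : Int))]).map (· + 1) := by simp
        simp only [List.nil_append, List.cons_append, this, hbs, List.map_cons]
      rw [hre]
      show PySem.List.slice (h :: p :: ps) (some 0) (some (b1 + 1))
          :: pvPairSlices (h :: p :: ps) ((b1 + 1) :: rest.map (· + 1))
          = pvGof prox h (p :: ps)
      have h01 : (b1 + 1) :: rest.map (· + 1) = (b1 :: rest).map (· + 1) := by simp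
      have hposr : ∀ x ∈ b1 :: rest, 0 ≤ x := by
        intro x hx
        exact hpos x (by rw [List.cons_append]; exact List.mem_cons_of_mem _ (hbs ▸ hx))
      rw [h01, pvPairSlices_shift h (p :: ps) _ hposr]
      have hih := ih p
      rw [List.cons_append, hbs, hg] at hih
      have hih' : PySem.List.slice (p :: ps) (some 0) (some b1)
          :: pvPairSlices (p :: ps) (b1 :: rest) = (p :: r) :: gs := hih
      have hsl : PySem.List.slice (p :: ps) (some 0) (some b1) = p :: r :=
        (List.cons.injEq _ _ _ _ ▸ hih').1
      have hrest : pvPairSlices (p :: ps) (b1 :: rest) = gs :=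
        (List.cons.injEq _ _ _ _ ▸ hih').2
      have hs0 : PySem.List.slice (h :: p :: ps) (some 0) (some (b1 + 1))
          = h :: PySem.List.slice (p :: ps) (some 0) (some (b1 + 1 - 1)) :=
        pvSlice_zero_cons h (p :: ps) (b1 + 1) (by omega)
      rw [hs0, show b1 + 1 - 1 = b1 from by ring, hsl, hrest]
      simp [pvGof, hg, show p - h ≤ prox from by omega]

-- ===== VERDICT (by name: the statement is the Claim_ definition above) =====
theorem group_nearby_positions_py_spec : Claim_equal_group_nearby_positions_py := by
  intro positions proximity _
  unfold Spec_group_nearby_positions_py group_nearby_positions_py group_nearby_positions_py_alt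
  by_cases hp : positions = []
  · subst hp
    have hnil : PySem.List.sorted ([] : List Int) (fun x => x) false = [] := by
      rw [PySem.List.sorted_eq_nil_iff]
    rw [if_pos rfl]
    simp [hnil]
  · rw [if_neg hp]
    have hs : PySem.List.sorted positions (fun x => x) false ≠ [] := by
      simpa [PySem.List.sorted_eq_nil_iff] using hp
    obtain ⟨h, t, he⟩ : ∃ h t, PySem.List.sorted positions (fun x => x) false = h :: t := by
      cases hq : PySem.List.sorted positions (fun x => x) false with
      | nil => exact absurd hq hs
      | cons a b => exact ⟨a, b, rfl⟩
    simp only [he, reduceCtorEq, if_false]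
    have hA : List.foldl (pyStepA proximity) [[h]] t = pvGof proximity h t := by
      have := pvFoldlA_eq proximity t [] [h]
      simp only [List.nil_append] at this
      rw [this, pvConsume_single]
    rw [hA, pvRangeSlices_eq]
    exact (pvSliced_eq proximity t h).symm
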